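-- pv_equiv track=rewrite | github.com/killaaruu/lab5_git | lab1.py | process_list_std
-- ===== SOURCE A (Python) =====
-- def process_list_std(a, b):
--     """
--     Обработка списка A с использованием стандартных функций.
--     Удаляет цепочки нечетных элементов, в которых нет ни одного элемента из списка B.
--
--     Параметры:
--         a (list): Список A для обработки.
--         b (list): Список B для проверки элементов.
--
--     Возвращает:
--         list: Обработанный список A.
--     """
--     i = 0
--     while i < len(a):
--         if a[i] % 2 != 0:
--             start = i
--             # Находим конец цепочки нечетных элементов
--             while i < len(a) and a[i] % 2 != 0:
--                 i += 1
--             end = i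
--
--             # Получаем подсписок цепочки
--             sublist = a[start:end]
--
--             # Проверяем пересечение с списком B
--             if not any(elem in b for elem in sublist):
--                 del a[start:end]
--                 i = start
--         else:
--             i += 1
--     return a
-- ===== SOURCE B (Python) =====
-- from itertools import groupby
--
-- def process_list_std(a, b):
--     result = []
--     for is_odd, grp in groupby(a, key=lambda x: x % 2 != 0):
--         run = list(grp)
--         if not is_odd or any(e in b for e in run):
--             result.extend(run)
--     a[:] = result
--     return a
-- ===== Notes on version B (the rewrite author's own statement) =====
-- stated objective: idiomatic
-- what changed: Replaced the index-juggling while loop with in-place slice deletion by a single itertools.groupby pass over maximal same-parity runs, keeping even runs and odd runs that intersect b, then writing the result back via a[:] = result.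
import Mathlib
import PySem

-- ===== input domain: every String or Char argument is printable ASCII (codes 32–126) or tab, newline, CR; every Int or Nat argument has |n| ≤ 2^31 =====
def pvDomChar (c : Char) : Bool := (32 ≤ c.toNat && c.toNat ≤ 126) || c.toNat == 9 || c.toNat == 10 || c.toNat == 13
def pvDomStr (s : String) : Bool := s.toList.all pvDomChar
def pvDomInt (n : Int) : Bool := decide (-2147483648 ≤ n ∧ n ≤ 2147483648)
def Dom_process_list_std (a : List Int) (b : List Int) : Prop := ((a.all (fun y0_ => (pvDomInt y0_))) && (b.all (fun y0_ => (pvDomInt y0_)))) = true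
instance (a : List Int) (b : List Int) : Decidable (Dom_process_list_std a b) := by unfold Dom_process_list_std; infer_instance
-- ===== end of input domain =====

-- B replaces A's index-juggling while loop (with in-place slice deletion) by one groupby-style
-- pass over maximal same-parity runs (objective: idiomatic).  A mutates `a` in place and returns
-- it; B performs the analogous in-place update (a[:] = result); the equivalence proved here is
-- about the RETURN value.

-- ===== PORT A =====
-- inner `while i < len(a) and a[i] % 2 != 0: i += 1` of A, returning the final i
def findEnd (a : List Int) (i : Nat) : Nat :=
  if h : i < a.length then
    if a[i] % 2 ≠ 0 then findEnd a (i + 1) else i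
  else i
termination_by a.length - i

-- the next three lemmas are cited by loopA's decreasing_by (termination of A's outer while)
theorem findEnd_ge (a : List Int) : ∀ i : Nat, i ≤ findEnd a i := by
  intro i
  induction i using findEnd.induct a with
  | case1 i h hodd ih => rw [findEnd]; simp [h, hodd]; omega
  | case2 i h hev => rw [findEnd]; simp [h, hev]
  | case3 i h => rw [findEnd]; simp [h]

theorem findEnd_le (a : List Int) : ∀ i : Nat, i ≤ a.length → findEnd a i ≤ a.length := by
  intro i
  induction i using findEnd.induct a with
  | case1 i h hodd ih => intro _; rw [findEnd]; simp [h, hodd]; exact ih (by omega)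
  | case2 i h hev => intro _; rw [findEnd]; simp [h, hev]; omega
  | case3 i h => intro hi; rw [findEnd]; simp [h]; omega

theorem findEnd_gt (a : List Int) (i : Nat) (h : i < a.length) (hodd : a[i] % 2 ≠ 0) :
    i < findEnd a i := by
  rw [findEnd]; simp [h, hodd]
  have := findEnd_ge a (i + 1); omega

-- outer `while i < len(a): …` of A; `del a[start:end]` is ported step for step as
-- take start ++ drop end (exact for 0 ≤ start ≤ end ≤ len, which holds here)
def loopA (b : List Int) (a : List Int) (i : Nat) : List Int :=
  if h : i < a.length then
    if hodd : a[i] % 2 ≠ 0 then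
      if (PySem.List.slice a (some (i : Int)) (some ((findEnd a i : Nat) : Int))).any
          (fun elem => b.contains elem) then
        loopA b a (findEnd a i)
      else
        loopA b (a.take i ++ a.drop (findEnd a i)) i
    else loopA b a (i + 1)
  else a
termination_by 2 * a.length - i
decreasing_by
  · have h1 := findEnd_gt a i h hodd
    have h2 := findEnd_le a i (by omega)
    omega
  · have h1 := findEnd_gt a i h hodd
    have h2 := findEnd_le a i (by omega)
    simp [List.length_take, List.length_drop]
    omega
  · omega

def process_list_std (a : List Int) (b : List Int) : List Int := loopA b a 0

-- ===== PORT B =====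
def oddB (x : Int) : Bool := x % 2 != 0

-- itertools.groupby(a, key=lambda x: x % 2 != 0), each group materialised as a list
def pyGroupByParity : List Int → List (Bool × List Int)
  | [] => []
  | x :: xs =>
      (oddB x, x :: xs.takeWhile (fun y => oddB y == oddB x)) ::
        pyGroupByParity (xs.dropWhile (fun y => oddB y == oddB x))
termination_by l => l.length
decreasing_by
  have := List.length_dropWhile_le (fun y => oddB y == oddB x) xs
  simp; omega

def process_list_std_alt (a : List Int) (b : List Int) : List Int :=
  (pyGroupByParity a).foldl
    (fun result g =>
      if !g.1 || g.2.any (fun e => b.contains e) then result ++ g.2 else result)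
    []

-- ===== PRECONDITION & SPEC =====
def Spec_process_list_std (a : List Int) (b : List Int) (out : List Int) : Prop := out = process_list_std_alt a b
instance (a : List Int) (b : List Int) (out : List Int) : Decidable (Spec_process_list_std a b out) := by unfold Spec_process_list_std; infer_instance

-- ===== CLAIM (what is proved, stated in full; the proofs are below) =====
def Claim_equal_process_list_std : Prop := ∀ (a : List Int) (b : List Int), Dom_process_list_std a b → Spec_process_list_std a b (process_list_std a b)

-- ===== LEMMAS AND PROOFS =====

-- run-based specification both ports are reduced to
def fSpec (b : List Int) : List Int → List Int
  | [] => []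
  | x :: xs =>
      if !(oddB x) || (x :: xs.takeWhile (fun y => oddB y == oddB x)).any (fun e => b.contains e)
      then (x :: xs.takeWhile (fun y => oddB y == oddB x)) ++ fSpec b (xs.dropWhile (fun y => oddB y == oddB x))
      else fSpec b (xs.dropWhile (fun y => oddB y == oddB x))
termination_by l => l.length
decreasing_by
  all_goals
    have := List.length_dropWhile_le (fun y => oddB y == oddB x) xs
    simp; omega

theorem foldl_groups (b : List Int) : ∀ (a acc : List Int),
    (pyGroupByParity a).foldl
      (fun result g =>
        if !g.1 || g.2.any (fun e => b.contains e) then result ++ g.2 else result)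
      acc = acc ++ fSpec b a := by
  intro a
  induction a using pyGroupByParity.induct with
  | case1 => intro acc; rw [pyGroupByParity, fSpec]; simp
  | case2 x xs ih =>
      intro acc
      rw [pyGroupByParity, fSpec, List.foldl_cons]
      dsimp only
      by_cases hk : (!(oddB x) || (x :: xs.takeWhile (fun y => oddB y == oddB x)).any
          (fun e => b.contains e)) = true
      · rw [if_pos hk, if_pos hk, ih, List.append_assoc]
      · rw [if_neg hk, if_neg hk, ih]

theorem alt_eq_fSpec (a b : List Int) : process_list_std_alt a b = fSpec b a := by
  rw [process_list_std_alt, foldl_groups b a []]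
  exact List.nil_append _

theorem takeWhile_congr' (p q : Int → Bool) (l : List Int) (h : ∀ y ∈ l, p y = q y) :
    l.takeWhile p = l.takeWhile q := by
  induction l with
  | nil => rfl
  | cons a l ih =>
      rw [List.takeWhile_cons, List.takeWhile_cons, h a (by simp),
        ih (fun y hy => h y (by simp [hy]))]

theorem dropWhile_congr' (p q : Int → Bool) (l : List Int) (h : ∀ y ∈ l, p y = q y) :
    l.dropWhile p = l.dropWhile q := by
  induction l with
  | nil => rfl
  | cons a l ih =>
      rw [List.dropWhile_cons, List.dropWhile_cons, h a (by simp),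
        ih (fun y hy => h y (by simp [hy]))]

theorem fSpec_even_cons (b : List Int) (x : Int) (xs : List Int) (hx : oddB x = false) :
    fSpec b (x :: xs) = x :: fSpec b xs := by
  cases xs with
  | nil => simp [fSpec, hx]
  | cons y ys =>
      by_cases hy : oddB y = true
      · rw [fSpec]
        have h1 : (oddB y == oddB x) = false := by rw [hx, hy]; rfl
        rw [List.takeWhile_cons, List.dropWhile_cons, h1]
        simp [hx]
      · have hy' : oddB y = false := by simp_all
        have h1 : (oddB y == oddB x) = true := by rw [hx, hy']; rfl
        rw [fSpec, fSpec]
        rw [List.takeWhile_cons, List.dropWhile_cons, h1]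
        simp [hx, hy']

theorem fSpec_odd_cons (b : List Int) (x : Int) (xs : List Int) (hx : oddB x = true) :
    fSpec b (x :: xs) =
      if (x :: xs.takeWhile oddB).any (fun e => b.contains e)
      then (x :: xs.takeWhile oddB) ++ fSpec b (xs.dropWhile oddB)
      else fSpec b (xs.dropWhile oddB) := by
  have h2 : ∀ z ∈ xs, (oddB z == oddB x) = oddB z := by
    intro z _; rw [hx]; cases oddB z <;> rfl
  rw [fSpec, takeWhile_congr' _ _ xs h2, dropWhile_congr' _ _ xs h2, hx]
  simp

theorem findEnd_eq (a : List Int) : ∀ i : Nat,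
    findEnd a i = i + ((a.drop i).takeWhile oddB).length := by
  intro i
  induction i using findEnd.induct a with
  | case1 i h hodd ih =>
      rw [findEnd, dif_pos h, if_pos hodd, ih]
      rw [List.drop_eq_getElem_cons h]
      have hox : oddB a[i] = true := by simp [oddB]; omega
      rw [List.takeWhile_cons, hox]
      simp; omega
  | case2 i h hev =>
      rw [findEnd, dif_pos h, if_neg hev]
      rw [List.drop_eq_getElem_cons h]
      have hox : oddB a[i] = false := by simp [oddB] at *; omega
      rw [List.takeWhile_cons, hox]
      simp
  | case3 i h =>
      rw [findEnd, dif_neg h]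
      rw [List.drop_of_length_le (by omega)]
      simp

theorem drop_takeWhile_len (p : Int → Bool) (l : List Int) :
    l.drop (l.takeWhile p).length = l.dropWhile p := by
  calc l.drop (l.takeWhile p).length
      = (l.takeWhile p ++ l.dropWhile p).drop (l.takeWhile p).length := by
        rw [List.takeWhile_append_dropWhile]
    _ = l.dropWhile p := List.drop_left

theorem take_takeWhile_len (p : Int → Bool) (l : List Int) :
    l.take (l.takeWhile p).length = l.takeWhile p := by
  calc l.take (l.takeWhile p).length
      = (l.takeWhile p ++ l.dropWhile p).take (l.takeWhile p).length := by
        rw [List.takeWhile_append_dropWhile]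
    _ = l.takeWhile p := List.take_left

theorem loopA_eq (b : List Int) : ∀ (a : List Int) (i : Nat), i ≤ a.length →
    loopA b a i = a.take i ++ fSpec b (a.drop i) := by
  intro a i
  induction a, i using loopA.induct b with
  | case1 a i h hodd hkeep ih =>
      -- odd chain intersecting b: kept, i jumps to the end of the chain
      intro _
      rw [loopA, dif_pos h, dif_pos hodd, if_pos hkeep,
        ih (findEnd_le a i (by omega))]
      have he := findEnd_eq a i
      set n := ((a.drop i).takeWhile oddB).length with hn
      have hrun : (a.drop i).take n = (a.drop i).takeWhile oddB := take_takeWhile_len _ _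
      have hrest : (a.drop i).drop n = (a.drop i).dropWhile oddB := drop_takeWhile_len _ _
      have hdi : a.drop i = a[i] :: a.drop (i + 1) := List.drop_eq_getElem_cons h
      have hox : oddB a[i] = true := by simp [oddB]; omega
      have hslice : PySem.List.slice a (some (i : Int)) (some ((findEnd a i : Nat) : Int))
          = (a.drop i).takeWhile oddB := by
        rw [he, PySem.List.slice_natCast]
        simpa using hrun
      rw [hslice] at hkeep
      have hW : (a.drop i).takeWhile oddB = a[i] :: (a.drop (i + 1)).takeWhile oddB := by
        rw [hdi, List.takeWhile_cons, hox]; simp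
      have hD : (a.drop i).dropWhile oddB = (a.drop (i + 1)).dropWhile oddB := by
        rw [hdi, List.dropWhile_cons, hox]; simp
      rw [hW] at hkeep
      have hF : fSpec b (a.drop i) = (a.drop i).takeWhile oddB ++ fSpec b ((a.drop i).dropWhile oddB) := by
        rw [hW, hD]
        conv_lhs => rw [hdi]
        rw [fSpec_odd_cons b _ _ hox, if_pos hkeep]
      rw [he, List.take_add, hrun, ← List.drop_drop, hrest, hF, List.append_assoc]
  | case2 a i h hodd hkeep ih =>
      -- odd chain disjoint from b: deleted, i stays
      intro _
      have he := findEnd_eq a i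
      have hle := findEnd_le a i (by omega)
      have hgt := findEnd_gt a i h hodd
      rw [loopA, dif_pos h, dif_pos hodd, if_neg hkeep,
        ih (by simp [List.length_take, List.length_drop]; omega)]
      set n := ((a.drop i).takeWhile oddB).length with hn
      have hrun : (a.drop i).take n = (a.drop i).takeWhile oddB := take_takeWhile_len _ _
      have hrest : (a.drop i).drop n = (a.drop i).dropWhile oddB := drop_takeWhile_len _ _
      have hdi : a.drop i = a[i] :: a.drop (i + 1) := List.drop_eq_getElem_cons h
      have hox : oddB a[i] = true := by simp [oddB]; omega
      have hslice : PySem.List.slice a (some (i : Int)) (some ((findEnd a i : Nat) : Int))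
          = (a.drop i).takeWhile oddB := by
        rw [he, PySem.List.slice_natCast]
        simpa using hrun
      rw [hslice] at hkeep
      have htk : (a.take i ++ a.drop (findEnd a i)).take i = a.take i := by
        rw [List.take_append_of_le_length (by simp; omega), List.take_take]
        simp
      have hdr : (a.take i ++ a.drop (findEnd a i)).drop i = a.drop (findEnd a i) := by
        rw [List.drop_append_of_le_length (by simp; omega)]
        rw [List.drop_take]
        simp
      have hW : (a.drop i).takeWhile oddB = a[i] :: (a.drop (i + 1)).takeWhile oddB := by
        rw [hdi, List.takeWhile_cons, hox]; simp
      have hD : (a.drop i).dropWhile oddB = (a.drop (i + 1)).dropWhile oddB := by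
        rw [hdi, List.dropWhile_cons, hox]; simp
      rw [hW] at hkeep
      have hF : fSpec b (a.drop i) = fSpec b ((a.drop i).dropWhile oddB) := by
        rw [hD]
        conv_lhs => rw [hdi]
        rw [fSpec_odd_cons b _ _ hox, if_neg hkeep]
      rw [htk, hdr, he, ← List.drop_drop, hrest, hF]
  | case3 a i h hodd ih =>
      -- even element: i += 1
      intro _
      rw [loopA, dif_pos h, dif_neg hodd, ih (by omega)]
      have hdi : a.drop i = a[i] :: a.drop (i + 1) := List.drop_eq_getElem_cons h
      have hox : oddB a[i] = false := by simp [oddB] at *; omega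
      rw [hdi, fSpec_even_cons b _ _ hox]
      have ht : a.take (i + 1) = a.take i ++ [a[i]] := by
        rw [List.take_succ, List.getElem?_eq_getElem h]; rfl
      rw [ht, List.append_assoc]; rfl
  | case4 a i h =>
      intro hle
      rw [loopA, dif_neg h]
      have : i = a.length := by omega
      subst this
      simp [fSpec]

-- ===== VERDICT (by name: the statement is the Claim_ definition above) =====
theorem process_list_std_spec : Claim_equal_process_list_std := by
  intro a b _
  unfold Spec_process_list_std process_list_std
  rw [alt_eq_fSpec, loopA_eq b a 0 (by omega)]
  simp
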